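-- pv_equiv track=rewrite | github.com/rwestein/aoc2024 | dec7.py | create_possibilities
-- ===== SOURCE A (Python) =====
-- def create_possibilities(operators, length):
--     possibilities = ['']
--     for i in range(length):
--         new_possibilities = []
--         for o in operators:
--             for p in possibilities:
--                 new_possibilities.append(p+o)
--         possibilities = new_possibilities
--     return possibilities
-- ===== SOURCE B (Python) =====
-- def create_possibilities(operators, length):
--     ops = list(operators)
--
--     def block(m):
--         # all strings of m operators; index i reads i as a base-k number,
--         # position t of the string = t-th least-significant digit
--         if m == 0:
--             return ['']
--         if m == 1:
--             return list(ops)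
--         h = m // 2
--         low = block(h)
--         high = block(m - h)
--         nl = len(low)
--         return [low[i % nl] + high[i // nl] for i in range(nl * len(high))]
--
--     return block(max(length, 0))
-- ===== Notes on version B (the rewrite author's own statement) =====
-- stated objective: alternative
-- what changed: Replaces A's length sequential passes that rebuild the whole list from scratch each pass with a divide-and-conquer base-k enumeration: block(m) glues block(m//2) and block(m-m//2) by decoding each index i as low[i % nl] + high[i // nl], so each output string is produced by one concatenation of two precomputed halves.
import Mathlib
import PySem

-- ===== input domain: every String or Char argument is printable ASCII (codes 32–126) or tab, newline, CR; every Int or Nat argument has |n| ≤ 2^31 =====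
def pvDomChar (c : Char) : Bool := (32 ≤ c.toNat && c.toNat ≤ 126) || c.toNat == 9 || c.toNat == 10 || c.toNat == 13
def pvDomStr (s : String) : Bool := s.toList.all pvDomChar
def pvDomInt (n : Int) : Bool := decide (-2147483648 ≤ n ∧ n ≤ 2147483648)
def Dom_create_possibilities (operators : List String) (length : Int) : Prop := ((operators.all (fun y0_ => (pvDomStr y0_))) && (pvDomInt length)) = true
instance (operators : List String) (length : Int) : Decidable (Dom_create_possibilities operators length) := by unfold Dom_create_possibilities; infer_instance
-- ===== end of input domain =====

-- B replaces A's pass-by-pass cartesian-product rebuilding with a single base-k decoding of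
-- each index i in range(k ** max(length, 0)); same cost, different algorithm (objective: alternative).

-- ===== PORT A =====
-- A: possibilities = ['']; length passes; each pass appends p+o for o in operators, p in possibilities.
def create_possibilities (operators : List String) (length : Int) : List String :=
  (PySem.List.pyRange 0 length 1).foldl
    (fun possibilities _i =>
      operators.foldl
        (fun new_possibilities o =>
          possibilities.foldl (fun acc p => acc ++ [p ++ o]) new_possibilities)
        [])
    [""]

-- ===== PORT B =====
-- B (divide and conquer): block(m) = all strings of m operators, index read as a base-k number
-- (position t = t-th least-significant digit); block(m) = [low[i % nl] + high[i // nl] ...] glues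
-- block(m//2) and block(m - m//2). List indexing (always in range here) is List.getD; range/len/
-- '//'/'%' on the nonnegative sizes are Nat operations, exact for Python here.
def pvBlock (ops : List String) : Nat → List String
  | 0 => [""]
  | 1 => ops
  | m + 2 =>
      let h := (m + 2) / 2
      let low := pvBlock ops h
      let high := pvBlock ops (m + 2 - h)
      (List.range (low.length * high.length)).map
        (fun i => low.getD (i % low.length) "" ++ high.getD (i / low.length) "")
decreasing_by all_goals omega

def create_possibilities_alt (operators : List String) (length : Int) : List String :=
  pvBlock operators (max length 0).toNat

-- ===== PRECONDITION & SPEC =====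
def Spec_create_possibilities (operators : List String) (length : Int) (out : List String) : Prop := out = create_possibilities_alt operators length
instance (operators : List String) (length : Int) (out : List String) : Decidable (Spec_create_possibilities operators length out) := by unfold Spec_create_possibilities; infer_instance

-- ===== CLAIM (what is proved, stated in full; the proofs are below) =====
def Claim_equal_create_possibilities : Prop := ∀ (operators : List String) (length : Int), Dom_create_possibilities operators length → Spec_create_possibilities operators length (create_possibilities operators length)

-- ===== LEMMAS AND PROOFS =====

-- a foldl whose body ignores the loop variable is function iteration
theorem foldl_const_iter {α β : Type} (f : α → α) (l : List β) (init : α) :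
    l.foldl (fun s _ => f s) init = f^[l.length] init := by
  induction l generalizing init with
  | nil => rfl
  | cons x xs ih => simp [List.foldl_cons, ih, Function.iterate_succ_apply]

-- one pass of A's outer loop
def AstepF (operators : List String) (poss : List String) : List String :=
  operators.foldl
    (fun new_possibilities o => poss.foldl (fun acc p => acc ++ [p ++ o]) new_possibilities)
    []

theorem AstepF_flat (operators poss : List String) :
    AstepF operators poss = operators.flatMap (fun o => poss.map (· ++ o)) := by
  unfold AstepF
  simp only [PySem.List.foldl_append_singleton_eq_map, PySem.List.foldl_append_eq_flatMap,
    List.nil_append]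

theorem A_iter (operators : List String) (n : Int) :
    create_possibilities operators n = (AstepF operators)^[n.toNat] [""] := by
  unfold create_possibilities
  rw [foldl_const_iter (fun possibilities =>
        operators.foldl
          (fun new_possibilities o =>
            possibilities.foldl (fun acc p => acc ++ [p ++ o]) new_possibilities)
          [])]
  rw [PySem.List.length_pyRange_one, show (n - 0).toNat = n.toNat by omega]
  rfl

-- base-k decoding into a string, Nat version (position 0 = least-significant digit)
def decN (operators : List String) : Nat → Nat → String
  | 0, _ => ""
  | m + 1, j => operators.getD (j % operators.length) "" ++ decN operators m (j / operators.length)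

theorem max_toNat (n : Int) : (max n 0).toNat = n.toNat := by
  rw [max_def]; split <;> omega

-- a flatMap over a list is the flatMap over its indices
theorem flatMap_range_getD {β : Type} (f : String → List β) :
    ∀ (operators : List String),
      operators.flatMap f
        = (List.range operators.length).flatMap (fun t => f (operators.getD t "")) := by
  intro operators
  induction operators with
  | nil => simp
  | cons o rest ih =>
      simp [List.range_succ_eq_map, List.flatMap_cons, List.flatMap_map, ih]

-- range (a*b) enumerated block by block
theorem range_mul_flat (a b : Nat) :
    List.range (a * b) = (List.range a).flatMap (fun t => (List.range b).map (fun r => t * b + r)) := by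
  induction a with
  | zero => simp
  | succ a ih =>
      rw [Nat.succ_mul, List.range_add, ih, List.range_succ, List.flatMap_append]
      simp

-- the digit decomposition: t becomes the most-significant digit
theorem decN_digit (operators : List String) :
    ∀ (m t r : Nat), t < operators.length → r < operators.length ^ m →
      decN operators (m + 1) (t * operators.length ^ m + r)
        = decN operators m r ++ operators.getD t "" := by
  intro m
  induction m with
  | zero =>
      intro t r ht hr
      have hr0 : r = 0 := by simpa using hr
      subst hr0
      simp [decN, Nat.mod_eq_of_lt ht]
  | succ m ih =>
      intro t r ht hr
      have hk : 0 < operators.length := lt_of_le_of_lt (Nat.zero_le t) ht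
      rw [show t * operators.length ^ (m + 1) + r
            = operators.length * (t * operators.length ^ m) + r by ring]
      show operators.getD
          ((operators.length * (t * operators.length ^ m) + r) % operators.length) ""
          ++ decN operators (m + 1)
              ((operators.length * (t * operators.length ^ m) + r) / operators.length)
        = decN operators (m + 1) r ++ operators.getD t ""
      rw [Nat.mul_add_mod, Nat.mul_add_div hk]
      rw [ih t (r / operators.length) ht
        (by
          have hr' := hr
          rw [pow_succ] at hr'
          exact (Nat.div_lt_iff_lt_mul hk).mpr hr')]
      simp [decN, String.append_assoc]

-- A's m-th pass equals B's enumeration of all k^m base-k decodings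
theorem A_main (operators : List String) :
    ∀ m : Nat, (AstepF operators)^[m] [""]
      = (List.range (operators.length ^ m)).map (decN operators m) := by
  intro m
  induction m with
  | zero => simp [List.range_one, decN]
  | succ m ih =>
      rw [Function.iterate_succ_apply', ih, AstepF_flat]
      rw [flatMap_range_getD]
      rw [pow_succ', range_mul_flat, List.map_flatMap]
      rw [List.flatMap_def, List.flatMap_def]
      congr 1
      apply List.map_congr_left
      intro t htmem
      rw [List.map_map, List.map_map]
      apply List.map_congr_left
      intro r hrmem
      simp only [Function.comp_apply]
      exact (decN_digit operators m t r (List.mem_range.mp htmem) (List.mem_range.mp hrmem)).symm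


theorem getD_map_range {β : Type} (f : Nat → β) (N t : Nat) (d : β) (ht : t < N) :
    ((List.range N).map f).getD t d = f t := by
  rw [List.getD_eq_getElem _ _ (by simpa using ht)]
  simp

theorem map_range_getD (operators : List String) :
    (List.range operators.length).map (fun t => operators.getD t "") = operators := by
  apply List.ext_getElem
  · simp
  · intro i h1 h2
    simp only [List.getElem_map, List.getElem_range]
    exact List.getD_eq_getElem _ _ h2

-- splitting a base-k decoding at position a
theorem decN_split (operators : List String) (b : Nat) :
    ∀ (a j : Nat), j < operators.length ^ (a + b) →
      decN operators (a + b) j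
        = decN operators a (j % operators.length ^ a)
            ++ decN operators b (j / operators.length ^ a) := by
  intro a
  induction a generalizing b with
  | zero => intro j _; simp [decN]
  | succ a ih =>
      intro j hj
      have hk : 0 < operators.length := by
        rcases Nat.eq_zero_or_pos operators.length with h0 | h
        · rw [h0, Nat.zero_pow (by omega)] at hj; omega
        · exact h
      have e1 : (j % operators.length ^ (a + 1)) % operators.length = j % operators.length :=
        Nat.mod_mod_of_dvd j (dvd_pow_self _ (by omega))
      have e2 : (j % operators.length ^ (a + 1)) / operators.length
          = (j / operators.length) % operators.length ^ a := by
        rw [pow_succ']; exact Nat.mod_mul_right_div_self j operators.length _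
      have e3 : j / operators.length ^ (a + 1)
          = (j / operators.length) / operators.length ^ a := by
        rw [pow_succ', ← Nat.div_div_eq_div_mul]
      have hj' : j / operators.length < operators.length ^ (a + b) := by
        rw [Nat.div_lt_iff_lt_mul hk, ← pow_succ]
        rw [show a + 1 + b = a + b + 1 from by omega] at hj
        exact hj
      rw [show a + 1 + b = (a + b) + 1 from by omega]
      simp only [decN]
      rw [e1, e2, e3, ih b (j / operators.length) hj', String.append_assoc]

-- B's divide-and-conquer block is exactly the base-k enumeration
theorem pvBlock_eq (operators : List String) :
    ∀ m : Nat, pvBlock operators m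
      = (List.range (operators.length ^ m)).map (decN operators m) := by
  intro m
  induction m using Nat.strong_induction_on with
  | _ m ih =>
      match m with
      | 0 => simp [pvBlock, List.range_one, decN]
      | 1 =>
          rw [pvBlock, pow_one]
          rw [show (List.range operators.length).map (decN operators 1)
              = (List.range operators.length).map (fun t => operators.getD t "") from
            List.map_congr_left (by
              intro t htmem
              simp [decN, Nat.mod_eq_of_lt (List.mem_range.mp htmem)])]
          exact (map_range_getD operators).symm
      | m + 2 =>
          rw [pvBlock]
          have hh : (m + 2) / 2 < m + 2 := by omega
          have hh' : m + 2 - (m + 2) / 2 < m + 2 := by omega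
          rw [ih _ hh, ih _ hh']
          simp only [List.length_map, List.length_range]
          rw [← pow_add, show (m + 2) / 2 + (m + 2 - (m + 2) / 2) = m + 2 by omega]
          apply List.map_congr_left
          intro i himem
          have hi := List.mem_range.mp himem
          have hk : 0 < operators.length := by
            rcases Nat.eq_zero_or_pos operators.length with h0 | h
            · rw [h0, Nat.zero_pow (by omega)] at hi; omega
            · exact h
          rw [getD_map_range _ _ _ _ (Nat.mod_lt _ (pow_pos hk _)),
              getD_map_range _ _ _ _ (by
                rw [Nat.div_lt_iff_lt_mul (pow_pos hk _), ← pow_add,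
                  show m + 2 - (m + 2) / 2 + (m + 2) / 2 = m + 2 by omega]
                exact hi)]
          have hsplit := decN_split operators (m + 2 - (m + 2) / 2) ((m + 2) / 2) i
            (by rw [show (m + 2) / 2 + (m + 2 - (m + 2) / 2) = m + 2 from by omega]; exact hi)
          rw [show (m + 2) / 2 + (m + 2 - (m + 2) / 2) = m + 2 from by omega] at hsplit
          exact hsplit.symm

theorem B_eq (operators : List String) (n : Int) :
    create_possibilities_alt operators n
      = (List.range (operators.length ^ n.toNat)).map (decN operators n.toNat) := by
  unfold create_possibilities_alt
  rw [max_toNat, pvBlock_eq]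

-- ===== VERDICT (by name: the statement is the Claim_ definition above) =====
theorem create_possibilities_spec : Claim_equal_create_possibilities := by
  intro operators n _dom
  unfold Spec_create_possibilities
  rw [A_iter, A_main, B_eq]
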